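-- pv_equiv track=rewrite | github.com/VolvoGroup/dymoval | src/dymoval/dataset.py | _list_to_structured_list_of_tuple
-- ===== SOURCE A (Python) =====
-- def _list_to_structured_list_of_tuple(
--     tpl: list[tuple[str, ...]], lst: list[str]
-- ) -> list[tuple[str, ...]]:
--     # Convert a plain list to a list of tuple of a given structure, i.e.
--     # Given tpl = [("a0","a1"),("b0",),("b1","a1","b0"),("a0","a1"),("b0",)]
--     # and lst = ["u0", "u1", "u2", "u3", "u4", "u5", "u6", "u7" , "u8"]
--     # it returns [("u0", "u1"), ("u2",), ("u3", "u4", "u5"), ("u6", "u7") , ("u8",)]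
--     R = []
--     idx = 0
--     for ii in [len(jj) for jj in tpl]:
--         R.append(tuple(lst[idx : idx + ii]))
--         idx += ii
--     return R
-- ===== SOURCE B (Python) =====
-- def _list_to_structured_list_of_tuple(
--     tpl: list[tuple[str, ...]], lst: list[str]
-- ) -> list[tuple[str, ...]]:
--     # Treat the flat list as a stack (reversed once, O(1) pops): for each tuple,
--     # pop one element per slot; a pop on an exhausted stack is simply skipped,
--     # which reproduces slice truncation when lst is short.
--     out = []
--     stack = list(reversed(lst))
--     for t in tpl:
--         chunk = []
--         for _ in t:
--             if stack:
--                 chunk.append(stack.pop())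
--         out.append(tuple(chunk))
--     return out
-- ===== Notes on version B (the rewrite author's own statement) =====
-- stated objective: alternative
-- what changed: A slices the flat list at an absolute running offset (lst[idx:idx+ii], idx += ii); B never slices or indexes lst: it reverses it once into a stack and pops one element per tuple slot, skipping pops when the stack is exhausted.
import Mathlib
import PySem

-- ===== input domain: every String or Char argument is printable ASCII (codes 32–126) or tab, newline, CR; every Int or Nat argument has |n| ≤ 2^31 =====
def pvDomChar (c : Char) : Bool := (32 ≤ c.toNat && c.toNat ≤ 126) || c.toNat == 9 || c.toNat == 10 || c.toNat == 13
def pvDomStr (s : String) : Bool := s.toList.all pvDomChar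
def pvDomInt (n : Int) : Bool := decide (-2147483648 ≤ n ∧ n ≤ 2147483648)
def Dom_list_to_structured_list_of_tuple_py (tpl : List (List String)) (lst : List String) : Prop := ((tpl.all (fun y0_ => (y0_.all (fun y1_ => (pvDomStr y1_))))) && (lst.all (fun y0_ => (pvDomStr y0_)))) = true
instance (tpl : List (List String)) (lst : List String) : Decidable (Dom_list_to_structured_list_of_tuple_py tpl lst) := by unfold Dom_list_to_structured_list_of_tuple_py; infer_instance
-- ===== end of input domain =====

-- B replaces A's absolute-offset slicing (running index into lst) by a stack discipline:
-- lst is reversed once and one element is popped per tuple slot (objective: alternative).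

-- ===== PORT A =====
-- one accumulating pass: state (R, idx), slice lst[idx : idx+ii] per tuple length ii
def list_to_structured_list_of_tuple_py (tpl : List (List String)) (lst : List String) : List (List String) :=
  ((tpl.map (fun jj => (jj.length : Int))).foldl
    (fun (st : List (List String) × Int) ii =>
      (st.1 ++ [PySem.List.slice lst (some st.2) (some (st.2 + ii))], st.2 + ii))
    (([] : List (List String)), (0 : Int))).1

-- ===== PORT B =====
-- inner loop: for _ in t: if stack: chunk.append(stack.pop())
def pvPopChunk (t : List String) (stack : List String) : List String × List String :=
  t.foldl
    (fun (st : List String × List String) _ =>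
      match st.2.getLast? with
      | none => st
      | some v => (st.1 ++ [v], st.2.dropLast))
    (([] : List String), stack)

-- outer loop: stack = list(reversed(lst)); per tuple, pop a chunk and append it
def list_to_structured_list_of_tuple_py_alt (tpl : List (List String)) (lst : List String) : List (List String) :=
  (tpl.foldl
    (fun (acc : List (List String) × List String) t =>
      let r := pvPopChunk t acc.2
      (acc.1 ++ [r.1], r.2))
    (([] : List (List String)), lst.reverse)).1

-- ===== PRECONDITION & SPEC =====
def Spec_list_to_structured_list_of_tuple_py (tpl : List (List String)) (lst : List String) (out : List (List String)) : Prop := out = list_to_structured_list_of_tuple_py_alt tpl lst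
instance (tpl : List (List String)) (lst : List String) (out : List (List String)) : Decidable (Spec_list_to_structured_list_of_tuple_py tpl lst out) := by unfold Spec_list_to_structured_list_of_tuple_py; infer_instance

-- ===== CLAIM (what is proved, stated in full; the proofs are below) =====
def Claim_equal_list_to_structured_list_of_tuple_py : Prop := ∀ (tpl : List (List String)) (lst : List String), Dom_list_to_structured_list_of_tuple_py tpl lst → Spec_list_to_structured_list_of_tuple_py tpl lst (list_to_structured_list_of_tuple_py tpl lst)

-- ===== LEMMAS AND PROOFS =====

-- popping len t times off r.reverse yields r's prefix (in order) and leaves r's suffix reversed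
theorem pvPopChunk_reverse : ∀ (t : List String) (chunk r : List String),
    t.foldl
      (fun (st : List String × List String) _ =>
        match st.2.getLast? with
        | none => st
        | some v => (st.1 ++ [v], st.2.dropLast))
      (chunk, r.reverse)
    = (chunk ++ r.take t.length, (r.drop t.length).reverse) := by
  intro t
  induction t with
  | nil => intro chunk r; simp
  | cons x ts ih =>
      intro chunk r
      cases r with
      | nil =>
          have h := ih chunk []
          simpa using h
      | cons a r' =>
          simp only [List.foldl_cons, List.reverse_cons, List.getLast?_concat,
            List.dropLast_concat]
          rw [ih (chunk ++ [a]) r']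
          simp [List.take_succ_cons, List.drop_succ_cons]

theorem pvPopChunk_eq (t r : List String) :
    pvPopChunk t r.reverse = (r.take t.length, (r.drop t.length).reverse) := by
  unfold pvPopChunk
  rw [pvPopChunk_reverse]
  simp

-- joint invariant: A's absolute offset k into lst corresponds to B's remainder lst.drop k
theorem pv_fold_agree (lst : List String) : ∀ (tpl : List (List String)) (R : List (List String)) (k : Nat),
    ((tpl.map (fun jj => (jj.length : Int))).foldl
      (fun (st : List (List String) × Int) ii =>
        (st.1 ++ [PySem.List.slice lst (some st.2) (some (st.2 + ii))], st.2 + ii))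
      (R, (k : Int))).1
    = (tpl.foldl
        (fun (acc : List (List String) × List String) t =>
          let r := pvPopChunk t acc.2
          (acc.1 ++ [r.1], r.2))
        (R, (lst.drop k).reverse)).1 := by
  intro tpl
  induction tpl with
  | nil => intro R k; simp
  | cons t ts ih =>
      intro R k
      simp only [List.map_cons, List.foldl_cons, pvPopChunk_eq, List.drop_drop]
      rw [PySem.List.slice_natCast_add,
        show (k : Int) + (t.length : Int) = ((k + t.length : Nat) : Int) by push_cast; ring]
      have h := ih (R ++ [List.take t.length (List.drop k lst)]) (k + t.length)
      simpa [Nat.add_comm] using h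

-- ===== VERDICT (by name: the statement is the Claim_ definition above) =====
theorem list_to_structured_list_of_tuple_py_spec : Claim_equal_list_to_structured_list_of_tuple_py := by
  intro tpl lst _
  show list_to_structured_list_of_tuple_py tpl lst = list_to_structured_list_of_tuple_py_alt tpl lst
  unfold list_to_structured_list_of_tuple_py list_to_structured_list_of_tuple_py_alt
  have h := pv_fold_agree lst tpl [] 0
  simpa using h
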